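-- pv_equiv track=rewrite | github.com/ASSERT-KTH/Mokav | experiments/pynguin/c4b/return-lst/generated_tests/src_403/4/src_403.py | func
-- ===== SOURCE A (Python) =====
-- def func(*args):
-- 	ret_values = []
--
-- 	k = int(args[0])
-- 	l = int(args[1])
-- 	m = int(args[2])
-- 	n = int(args[3])
-- 	d = int(args[4])
-- 	dragons = 0
-- 	for x in range(1, (d + 1)):
-- 	    if ((x % k) == 0):
-- 	        dragons += 1
-- 	    elif ((x % l) == 0):
-- 	        dragons += 1
-- 	    elif ((x % m) == 0):
-- 	        dragons += 1
-- 	    elif ((x % n) == 0):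
-- 	        dragons += 1
-- 	ret_values.append(dragons)
--
-- 	return ret_values
-- ===== SOURCE B (Python) =====
-- def _gcd(a, b):
--     while b:
--         a, b = b, a % b
--     return a
--
--
-- def _lcm(a, b):
--     return a * b // _gcd(a, b)
--
--
-- def func(*args):
--     k = int(args[0])
--     l = int(args[1])
--     m = int(args[2])
--     n = int(args[3])
--     d = int(args[4])
--     a, b, c, e = abs(k), abs(l), abs(m), abs(n)
--     hi = d if d > 0 else 0
--     ab = _lcm(a, b); ac = _lcm(a, c); ae = _lcm(a, e)
--     bc = _lcm(b, c); be = _lcm(b, e); ce = _lcm(c, e)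
--     abc = _lcm(ab, c); abe = _lcm(ab, e); ace = _lcm(ac, e); bce = _lcm(bc, e)
--     abce = _lcm(abc, e)
--     cnt = (hi // a + hi // b + hi // c + hi // e
--            - hi // ab - hi // ac - hi // ae - hi // bc - hi // be - hi // ce
--            + hi // abc + hi // abe + hi // ace + hi // bce
--            - hi // abce)
--     return [cnt]
-- ===== Notes on version B (the rewrite author's own statement) =====
-- stated objective: faster
-- what changed: Replaces the O(d) loop testing each x in 1..d against the four divisors by a closed-form inclusion-exclusion over the 15 nonempty divisor subsets using pairwise LCMs (15 floor divisions, O(1)).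
-- outside the precondition, e.g. on func(1, 0, 2, 3, 5): A returns [5], B raises ZeroDivisionError; on func(0, 1, 2, 3, 0): A returns [0], B raises ZeroDivisionError
import Mathlib
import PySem

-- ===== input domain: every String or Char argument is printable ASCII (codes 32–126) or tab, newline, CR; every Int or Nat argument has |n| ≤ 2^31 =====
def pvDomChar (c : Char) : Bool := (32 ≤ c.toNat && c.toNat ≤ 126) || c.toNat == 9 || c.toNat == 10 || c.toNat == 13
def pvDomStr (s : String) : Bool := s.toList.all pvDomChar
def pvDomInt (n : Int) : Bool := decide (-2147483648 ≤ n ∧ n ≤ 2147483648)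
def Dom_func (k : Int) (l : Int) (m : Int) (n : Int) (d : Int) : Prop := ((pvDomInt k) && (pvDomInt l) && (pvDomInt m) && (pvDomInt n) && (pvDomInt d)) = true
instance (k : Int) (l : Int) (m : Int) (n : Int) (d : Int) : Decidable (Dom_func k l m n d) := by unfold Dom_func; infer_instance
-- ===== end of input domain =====

-- B replaces A's O(d) scan of 1..d by a closed-form inclusion-exclusion over the 15
-- nonempty subsets of the four divisors using pairwise LCMs (15 floor divisions, O(1)).


-- ===== PORT A =====
-- int(args[i]) on an int argument is the identity and is dropped.
def func (k : Int) (l : Int) (m : Int) (n : Int) (d : Int) : List Int :=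
  let dragons : Int :=
    (PySem.List.pyRange 1 (d + 1) 1).foldl
      (fun dragons x =>
        if PySem.Int.mod x k == 0 then dragons + 1
        else if PySem.Int.mod x l == 0 then dragons + 1
        else if PySem.Int.mod x m == 0 then dragons + 1
        else if PySem.Int.mod x n == 0 then dragons + 1
        else dragons) 0
  [dragons]

-- ===== PORT B =====
-- Source B's hand-written Euclid loop 'while b: a, b = b, a % b' (Python % = PySem.Int.mod)
def pygcd (a : Int) (b : Int) : Int :=
  if hb : b = 0 then a else pygcd b (PySem.Int.mod a b)
termination_by b.natAbs
decreasing_by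
  rcases lt_or_gt_of_ne hb with h | h
  · have := PySem.Int.mod_neg_bounds a h
    omega
  · have h1 := PySem.Int.mod_nonneg a h
    have h2 := PySem.Int.mod_lt a h
    omega

-- Source B's _lcm(a, b) = a * b // _gcd(a, b)
def pylcm (a : Int) (b : Int) : Int := PySem.Int.floordiv (a * b) (pygcd a b)

def func_alt (k : Int) (l : Int) (m : Int) (n : Int) (d : Int) : List Int :=
  let a := |k|
  let b := |l|
  let c := |m|
  let e := |n|
  let hi := if d > 0 then d else 0
  let ab := pylcm a b
  let ac := pylcm a c
  let ae := pylcm a e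
  let bc := pylcm b c
  let be := pylcm b e
  let ce := pylcm c e
  let abc := pylcm ab c
  let abe := pylcm ab e
  let ace := pylcm ac e
  let bce := pylcm bc e
  let abce := pylcm abc e
  let cnt := PySem.Int.floordiv hi a + PySem.Int.floordiv hi b + PySem.Int.floordiv hi c + PySem.Int.floordiv hi e
    - PySem.Int.floordiv hi ab - PySem.Int.floordiv hi ac - PySem.Int.floordiv hi ae
    - PySem.Int.floordiv hi bc - PySem.Int.floordiv hi be - PySem.Int.floordiv hi ce
    + PySem.Int.floordiv hi abc + PySem.Int.floordiv hi abe + PySem.Int.floordiv hi ace + PySem.Int.floordiv hi bce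
    - PySem.Int.floordiv hi abce
  [cnt]

-- ===== PRECONDITION & SPEC =====
-- Pre_ excludes inputs with a zero divisor: there A raises ZeroDivisionError whenever the
-- zero is reached (d ≥ 1 and not shadowed by an earlier divisor of absolute value 1), and
-- accidentally returns otherwise; B's lcm/floor-division arithmetic raises on all of them.
def Pre_func (k : Int) (l : Int) (m : Int) (n : Int) (d : Int) : Prop :=
  k ≠ 0 ∧ l ≠ 0 ∧ m ≠ 0 ∧ n ≠ 0
instance (k : Int) (l : Int) (m : Int) (n : Int) (d : Int) : Decidable (Pre_func k l m n d) := by unfold Pre_func; infer_instance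
def pvWitness_func : Int × Int × Int × Int × Int := (2, 3, 4, 5, 10)

def Spec_func (k : Int) (l : Int) (m : Int) (n : Int) (d : Int) (out : List Int) : Prop := out = func_alt k l m n d
instance (k : Int) (l : Int) (m : Int) (n : Int) (d : Int) (out : List Int) : Decidable (Spec_func k l m n d out) := by unfold Spec_func; infer_instance

-- ===== CLAIM (what is proved, stated in full; the proofs are below) =====
def Claim_equal_func : Prop := ∀ (k : Int) (l : Int) (m : Int) (n : Int) (d : Int), Dom_func k l m n d → Pre_func k l m n d → Spec_func k l m n d (func k l m n d)

-- ===== LEMMAS AND PROOFS =====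

-- Source B's Euclid loop computes the Nat gcd on nonnegative arguments
theorem pygcd_natCast (b a : Nat) : pygcd (a : Int) (b : Int) = (Nat.gcd a b : Int) := by
  induction b using Nat.strong_induction_on generalizing a with
  | _ b ih =>
    rw [pygcd]
    rcases Nat.eq_zero_or_pos b with hb | hb
    · simp [hb]
    · have hbz : (b : Int) ≠ 0 := by exact_mod_cast Nat.pos_iff_ne_zero.mp hb
      rw [dif_neg hbz, PySem.Int.mod_natCast a b, ih (a % b) (Nat.mod_lt a hb) b]
      rw [Nat.gcd_comm b (a % b), ← Nat.gcd_rec, Nat.gcd_comm]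

-- Source B's _lcm computes the Nat lcm on nonnegative arguments
theorem pylcm_natCast (a b : Nat) : pylcm (a : Int) (b : Int) = (Nat.lcm a b : Int) := by
  rw [pylcm, pygcd_natCast]
  have : ((a : Int) * (b : Int)) = ((a * b : Nat) : Int) := by push_cast; ring
  rw [this, PySem.Int.floordiv_natCast]
  rfl

-- pointwise inclusion-exclusion identity
theorem ie_point (a b c e x : Nat) :
    (if a ∣ x ∨ b ∣ x ∨ c ∣ x ∨ e ∣ x then (1 : Int) else 0)
    = (if a ∣ x then (1 : Int) else 0) + (if b ∣ x then 1 else 0) + (if c ∣ x then 1 else 0) + (if e ∣ x then 1 else 0)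
      - (if Nat.lcm a b ∣ x then 1 else 0) - (if Nat.lcm a c ∣ x then 1 else 0) - (if Nat.lcm a e ∣ x then 1 else 0)
      - (if Nat.lcm b c ∣ x then 1 else 0) - (if Nat.lcm b e ∣ x then 1 else 0) - (if Nat.lcm c e ∣ x then 1 else 0)
      + (if Nat.lcm (Nat.lcm a b) c ∣ x then 1 else 0) + (if Nat.lcm (Nat.lcm a b) e ∣ x then 1 else 0)
      + (if Nat.lcm (Nat.lcm a c) e ∣ x then 1 else 0) + (if Nat.lcm (Nat.lcm b c) e ∣ x then 1 else 0)
      - (if Nat.lcm (Nat.lcm (Nat.lcm a b) c) e ∣ x then 1 else 0) := by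
  simp only [Nat.lcm_dvd_iff]
  by_cases ha : a ∣ x <;> by_cases hb : b ∣ x <;> by_cases hc : c ∣ x <;> by_cases he : e ∣ x <;>
    simp [ha, hb, hc, he]

-- cast form of Nat.succ_div
theorem succ_div_cast (t L : Nat) :
    (((t + 1) / L : Nat) : Int) = ((t / L : Nat) : Int) + (if L ∣ (t + 1) then 1 else 0) := by
  rw [Nat.succ_div]
  push_cast
  split_ifs <;> simp

-- the central counting identity: the scan of 1..t equals the inclusion-exclusion sum
theorem central (a b c e : Nat) (t : Nat) :
    (((PySem.List.pyRange 1 ((t : Int) + 1) 1).countP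
        (fun x => decide ((a : Int) ∣ x ∨ (b : Int) ∣ x ∨ (c : Int) ∣ x ∨ (e : Int) ∣ x)) : Nat) : Int)
    = ((t / a : Nat) : Int) + ((t / b : Nat) : Int) + ((t / c : Nat) : Int) + ((t / e : Nat) : Int)
      - ((t / Nat.lcm a b : Nat) : Int) - ((t / Nat.lcm a c : Nat) : Int) - ((t / Nat.lcm a e : Nat) : Int)
      - ((t / Nat.lcm b c : Nat) : Int) - ((t / Nat.lcm b e : Nat) : Int) - ((t / Nat.lcm c e : Nat) : Int)
      + ((t / Nat.lcm (Nat.lcm a b) c : Nat) : Int) + ((t / Nat.lcm (Nat.lcm a b) e : Nat) : Int)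
      + ((t / Nat.lcm (Nat.lcm a c) e : Nat) : Int) + ((t / Nat.lcm (Nat.lcm b c) e : Nat) : Int)
      - ((t / Nat.lcm (Nat.lcm (Nat.lcm a b) c) e : Nat) : Int) := by
  induction t with
  | zero => simp [PySem.List.pyRange_one_eq_nil]
  | succ t ih =>
    have hsplit : PySem.List.pyRange 1 ((t + 1 : Nat) : Int) 1 ++ [((t + 1 : Nat) : Int)]
        = PySem.List.pyRange 1 (((t + 1 : Nat) : Int) + 1) 1 := by
      rw [PySem.List.pyRange_one_succ_right]
      push_cast; omega
    rw [← hsplit, List.countP_append, List.countP_singleton]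
    simp only [Nat.cast_add, Nat.cast_ite, Nat.cast_one, Nat.cast_zero]
    rw [ih]
    simp only [decide_eq_true_eq]
    rw [show ((t : Int) + 1) = ((t + 1 : Nat) : Int) by push_cast; ring]
    simp only [Int.natCast_dvd_natCast]
    rw [succ_div_cast t a, succ_div_cast t b, succ_div_cast t c, succ_div_cast t e,
        succ_div_cast t (Nat.lcm a b), succ_div_cast t (Nat.lcm a c), succ_div_cast t (Nat.lcm a e),
        succ_div_cast t (Nat.lcm b c), succ_div_cast t (Nat.lcm b e), succ_div_cast t (Nat.lcm c e),
        succ_div_cast t (Nat.lcm (Nat.lcm a b) c), succ_div_cast t (Nat.lcm (Nat.lcm a b) e),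
        succ_div_cast t (Nat.lcm (Nat.lcm a c) e), succ_div_cast t (Nat.lcm (Nat.lcm b c) e),
        succ_div_cast t (Nat.lcm (Nat.lcm (Nat.lcm a b) c) e)]
    rw [ie_point a b c e (t + 1)]
    ring

-- the A-side loop body is a single test for divisibility by any of the four divisors
theorem stepA (k l m n dr x : Int) :
    (if PySem.Int.mod x k == 0 then dr + 1
     else if PySem.Int.mod x l == 0 then dr + 1
     else if PySem.Int.mod x m == 0 then dr + 1
     else if PySem.Int.mod x n == 0 then dr + 1
     else dr)
    = if ((k.natAbs : Int) ∣ x ∨ (l.natAbs : Int) ∣ x ∨ (m.natAbs : Int) ∣ x ∨ (n.natAbs : Int) ∣ x)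
      then dr + 1 else dr := by
  simp only [beq_iff_eq, PySem.Int.mod_eq_zero_iff_dvd, Int.natAbs_dvd]
  by_cases h1 : k ∣ x <;> by_cases h2 : l ∣ x <;> by_cases h3 : m ∣ x <;> by_cases h4 : n ∣ x <;>
    simp [h1, h2, h3, h4]

-- ===== VERDICT (by name: the statement is the Claim_ definition above) =====
theorem func_spec : Claim_equal_func := by
  intro k l m n d _hdom hpre
  obtain ⟨hk, hl, hm, hn⟩ := hpre
  have hrange : PySem.List.pyRange 1 (d + 1) 1 = PySem.List.pyRange 1 ((d.toNat : Int) + 1) 1 := by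
    by_cases hd : d ≤ 0
    · rw [PySem.List.pyRange_one_eq_nil (by omega), PySem.List.pyRange_one_eq_nil (by omega)]
    · congr 1
      omega
  have hhi : (if d > 0 then d else 0) = ((d.toNat : Nat) : Int) := by
    split_ifs <;> omega
  simp only [Spec_func, func, func_alt, stepA, hrange, hhi, Int.abs_eq_natAbs]
  rw [PySem.List.foldl_ite_add_one]
  simp only [pylcm_natCast, PySem.Int.floordiv_natCast]
  rw [central k.natAbs l.natAbs m.natAbs n.natAbs d.toNat, zero_add]
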